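-- pv_equiv track=rewrite | github.com/mayrinck01/imersao-openclaw-negocios | automacoes/scripts/mogo_excel.py | order_columns_by_first_record
-- ===== SOURCE A (Python) =====
-- def order_columns_by_first_record(first_record, columns):
--     """
--     Reordena COLUNAS para seguir a ordem exata do primeiro registro retornado pela API.
--
--     - `first_record`: dict do primeiro item retornado pelo relatório
--     - `columns`: lista de tuplas (chave, header)
--
--     Colunas conhecidas seguem a ordem do dict original.
--     Colunas extras definidas manualmente, mas ausentes no registro, ficam no final,
--     preservando a ordem relativa original.
--     """
--     if not first_record or not isinstance(first_record, dict):
--         return columns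
--
--     order_index = {key: idx for idx, key in enumerate(first_record.keys())}
--
--     known = [col for col in columns if col[0] in order_index]
--     unknown = [col for col in columns if col[0] not in order_index]
--
--     known.sort(key=lambda col: order_index[col[0]])
--     return known + unknown
-- ===== SOURCE B (Python) =====
-- def order_columns_by_first_record(first_record, columns):
--     """Group columns by key once, then emit buckets in the first record's key
--     order; no sort needed."""
--     if not first_record or not isinstance(first_record, dict):
--         return columns
--     buckets = {}
--     for col in columns:
--         buckets.setdefault(col[0], []).append(col)
--     result = []
--     for key in first_record.keys():
--         result += buckets.get(key, [])
--     result += [col for col in columns if col[0] not in first_record]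
--     return result
-- ===== Notes on version B (the rewrite author's own statement) =====
-- stated objective: alternative
-- what changed: Replaces the build-index-then-stable-sort pipeline by a single grouping pass: columns are bucketed by key into a dict, then buckets are emitted in the first record's key order and unknown columns appended, with no sort at all.
import Mathlib
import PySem

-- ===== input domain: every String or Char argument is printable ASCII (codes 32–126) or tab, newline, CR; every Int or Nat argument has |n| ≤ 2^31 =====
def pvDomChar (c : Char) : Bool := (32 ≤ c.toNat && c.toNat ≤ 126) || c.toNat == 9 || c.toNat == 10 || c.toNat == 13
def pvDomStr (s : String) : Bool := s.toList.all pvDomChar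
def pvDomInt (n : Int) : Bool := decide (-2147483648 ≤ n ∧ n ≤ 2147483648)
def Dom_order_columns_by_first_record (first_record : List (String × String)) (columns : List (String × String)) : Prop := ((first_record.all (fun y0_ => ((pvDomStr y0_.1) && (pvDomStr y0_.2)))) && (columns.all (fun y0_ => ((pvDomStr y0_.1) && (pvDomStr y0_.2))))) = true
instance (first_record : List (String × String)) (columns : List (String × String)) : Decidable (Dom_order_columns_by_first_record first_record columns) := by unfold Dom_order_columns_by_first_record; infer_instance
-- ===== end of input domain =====

-- ===== PORT A =====
-- B groups columns by key in one pass and emits buckets in the first record's key order instead of building an index dict and stable-sorting (alternative decomposition, no sort).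
def order_columns_by_first_record (first_record : List (String × String)) (columns : List (String × String)) : List (String × String) :=
  if first_record = [] then columns
  else
    let keys := PySem.List.dedup (first_record.map Prod.fst)
    let orderIndex : PySem.Dict String Int :=
      (PySem.List.enumerate keys).foldl (fun d p => d.insert p.2 p.1) PySem.Dict.empty
    let known := columns.filter (fun col => orderIndex.contains col.1)
    let unknown := columns.filter (fun col => !(orderIndex.contains col.1))
    PySem.List.sorted known (fun col => orderIndex.getD col.1 0) ++ unknown

-- ===== PORT B =====
def order_columns_by_first_record_alt (first_record : List (String × String)) (columns : List (String × String)) : List (String × String) :=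
  if first_record = [] then columns
  else
    let buckets : PySem.Dict String (List (String × String)) :=
      columns.foldl (fun d col => d.modify col.1 [] (fun l => l ++ [col])) PySem.Dict.empty
    let keys := PySem.List.dedup (first_record.map Prod.fst)
    let result := keys.foldl (fun acc k => acc ++ buckets.getD k []) []
    result ++ columns.filter (fun col => !(keys.contains col.1))

-- ===== PRECONDITION & SPEC =====
def Spec_order_columns_by_first_record (first_record : List (String × String)) (columns : List (String × String)) (out : List (String × String)) : Prop := out = order_columns_by_first_record_alt first_record columns
instance (first_record : List (String × String)) (columns : List (String × String)) (out : List (String × String)) : Decidable (Spec_order_columns_by_first_record first_record columns out) := by unfold Spec_order_columns_by_first_record; infer_instance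

-- ===== CLAIM (what is proved, stated in full; the proofs are below) =====
def Claim_equal_order_columns_by_first_record : Prop := ∀ (first_record : List (String × String)) (columns : List (String × String)), Dom_order_columns_by_first_record first_record columns → Spec_order_columns_by_first_record first_record columns (order_columns_by_first_record first_record columns)


-- ===== LEMMAS AND PROOFS =====

lemma bucket_getD (cols : List (String × String)) (d : PySem.Dict String (List (String × String))) (k : String) :
    (cols.foldl (fun d col => d.modify col.1 [] (fun l => l ++ [col])) d).getD k []
      = d.getD k [] ++ cols.filter (fun c => c.1 == k) := by
  induction cols generalizing d with
  | nil => simp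
  | cons c cs ih =>
    rw [List.foldl_cons, ih]
    by_cases h : c.1 = k
    · simp [h]
    · simp [PySem.Dict.getD_modify, Ne.symm h, (by simpa using h : (c.1 == k) = false)]

lemma insertBy_all_false {α : Type} (before : α → α → Bool) (x : α) (as bs : List α)
    (h : ∀ y ∈ as, before x y = false) :
    PySem.List.insertBy before x (as ++ bs) = as ++ PySem.List.insertBy before x bs := by
  induction as with
  | nil => simp
  | cons a t ih =>
    simp only [List.cons_append, PySem.List.insertBy, h a (by simp)]
    simp only [Bool.false_eq_true, if_false, List.cons.injEq, true_and]
    exact ih (fun y hy => h y (by simp [hy]))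

lemma insertBy_all_true {α : Type} (before : α → α → Bool) (x : α) (ys : List α)
    (h : ∀ y ∈ ys, before x y = true) :
    PySem.List.insertBy before x ys = x :: ys := by
  cases ys with
  | nil => rfl
  | cons y t => simp [PySem.List.insertBy, h y (by simp)]

lemma insert_bucketed (f : String → Int) (ks : List String)
    (hks : ks.Pairwise (fun a b => f a < f b))
    (p : List (String × String)) (x : String × String) (hx : x.1 ∈ ks) :
    PySem.List.insertBy (fun a b => decide (f a.1 < f b.1)) x
      (ks.flatMap (fun k => p.filter (fun c => c.1 == k)))
    = ks.flatMap (fun k => (p ++ [x]).filter (fun c => c.1 == k)) := by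
  induction ks generalizing p with
  | nil => cases hx
  | cons k ks ih =>
    have hpw := List.pairwise_cons.mp hks
    have hbucket : ∀ y ∈ p.filter (fun c => c.1 == k), y.1 = k := by
      intro y hy
      simpa using (List.of_mem_filter hy)
    by_cases hxk : x.1 = k
    · rw [List.flatMap_cons,
        insertBy_all_false _ _ _ _ (by
          intro y hy
          simp [hbucket y hy, hxk]),
        insertBy_all_true _ _ _ (by
          intro y hy
          rcases List.mem_flatMap.mp hy with ⟨k', hk', hy'⟩
          have : y.1 = k' := by simpa using (List.of_mem_filter hy')
          simp [this, hxk]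
          exact hpw.1 k' hk')]
      have hx_ne : ∀ k' ∈ ks, (x.1 == k') = false := by
        intro k' hk'
        have := hpw.1 k' hk'
        simp [hxk]
        intro he; rw [he] at this; exact lt_irrefl _ this
      rw [List.flatMap_cons,
        List.flatMap_congr (f := fun k' => (p ++ [x]).filter (fun c => c.1 == k'))
          (g := fun k' => p.filter (fun c => c.1 == k'))
          (by intro k' hk'; simp [List.filter_append, hx_ne k' hk'])]
      simp [List.filter_append, hxk]
    · have hx' : x.1 ∈ ks := by
        rcases List.mem_cons.mp hx with h | h
        · exact absurd h hxk
        · exact h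
      have hlt : f k < f x.1 := hpw.1 x.1 hx'
      rw [List.flatMap_cons,
        insertBy_all_false _ _ _ _ (by
          intro y hy
          simp [hbucket y hy]
          omega),
        ih hpw.2 p hx']
      rw [List.flatMap_cons]
      have : (p ++ [x]).filter (fun c => c.1 == k) = p.filter (fun c => c.1 == k) := by
        simp [List.filter_append, (by simpa using hxk : (x.1 == k) = false)]
      rw [this]

lemma foldl_insertBy_bucketed (f : String → Int) (ks : List String)
    (hks : ks.Pairwise (fun a b => f a < f b)) :
    ∀ (q p : List (String × String)), (∀ x ∈ q, x.1 ∈ ks) →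
      q.foldl (fun acc x => PySem.List.insertBy (fun a b => decide (f a.1 < f b.1)) x acc)
        (ks.flatMap (fun k => p.filter (fun c => c.1 == k)))
      = ks.flatMap (fun k => (p ++ q).filter (fun c => c.1 == k)) := by
  intro q
  induction q with
  | nil => intro p _; simp
  | cons x q ih =>
    intro p hq
    rw [List.foldl_cons, insert_bucketed f ks hks p x (hq x (by simp))]
    have := ih (p ++ [x]) (fun y hy => hq y (by simp [hy]))
    simpa using this

-- ===== VERDICT (by name: the statement is the Claim_ definition above) =====
theorem order_columns_by_first_record_spec : Claim_equal_order_columns_by_first_record := by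
  intro fr cols _
  unfold Spec_order_columns_by_first_record
  unfold order_columns_by_first_record order_columns_by_first_record_alt
  by_cases hfr : fr = []
  · simp [hfr]
  · simp only [hfr, if_false]
    set ks := PySem.List.dedup (fr.map Prod.fst) with hks_def
    have hnd : ks.Nodup := PySem.List.nodup_dedup _
    set oi : PySem.Dict String Int :=
      (PySem.List.enumerate ks).foldl (fun d p => d.insert p.2 p.1) PySem.Dict.empty with hoi_def
    -- keys of the index dict are exactly ks
    have hkeys : oi.keys = ks := by
      rw [hoi_def, PySem.Dict.keys_foldl_insert_key]
      simp only [PySem.List.map_snd_enumerate, PySem.Dict.keys_empty]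
      rw [PySem.Set.update_nil_left]
      exact PySem.Set.ofList_eq_self_of_nodup _ hnd
    have hcont : ∀ s, oi.contains s = ks.contains s := by
      intro s
      rw [PySem.Dict.contains_eq_decide_mem_keys, hkeys]
      simp
    -- the index value of ks[i] is i
    have hitems : oi.items = (PySem.List.enumerate ks).map (fun p => (p.2, p.1)) := by
      rw [hoi_def, PySem.Dict.items_foldl_insert_fresh _ _ _ _ (by simp) (by
        simpa [PySem.List.map_snd_enumerate] using hnd)]
      rfl
    have hval : ∀ (i : Nat) (h : i < ks.length), oi.getD ks[i] 0 = (i : Int) := by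
      intro i h
      have hlen : i < (PySem.List.enumerate ks 0).length := by
        simpa [PySem.List.length_enumerate] using h
      have hmem : ((ks[i] : String), ((0 : Int) + i)) ∈ oi.items := by
        rw [hitems]
        refine List.mem_map.mpr ⟨((0 : Int) + i, ks[i]), ?_, rfl⟩
        rw [← PySem.List.getElem_enumerate ks 0 i hlen]
        exact List.getElem_mem hlen
      have := PySem.Dict.getD_of_mem_items oi hmem (by rw [hkeys]; exact hnd) 0
      simpa using this
    have hpf : ks.Pairwise (fun a b => oi.getD a 0 < oi.getD b 0) := by
      rw [List.pairwise_iff_getElem]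
      intro i j hi hj hij
      rw [hval i hi, hval j hj]
      exact_mod_cast hij
    -- A's sorted known block equals the bucket concatenation
    have hknown_mem : ∀ x ∈ cols.filter (fun col => oi.contains col.1), x.1 ∈ ks := by
      intro x hx
      have := List.of_mem_filter hx
      rw [hcont] at this
      simpa using this
    have hA : PySem.List.sorted (cols.filter (fun col => oi.contains col.1))
        (fun col => oi.getD col.1 0)
        = ks.flatMap (fun k => cols.filter (fun c => c.1 == k)) := by
      rw [PySem.List.sorted_eq_foldl_insertBy]
      have h0 : ([] : List (String × String))
          = ks.flatMap (fun k => ([] : List (String × String)).filter (fun c => c.1 == k)) := by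
        simp
      rw [h0, foldl_insertBy_bucketed _ ks hpf _ [] hknown_mem]
      refine List.flatMap_congr ?_
      intro k hk
      simp only [List.nil_append]
      rw [List.filter_filter]
      refine List.filter_congr ?_
      intro c _
      by_cases hc : c.1 = k
      · have hck : oi.contains k = true := by
          rw [hcont]
          simp [hk]
        simp [hc, hck]
      · simp [(by simpa using hc : (c.1 == k) = false)]
    -- B's bucket loop
    have hB : ks.foldl (fun acc k =>
          acc ++ (cols.foldl (fun d col => d.modify col.1 [] (fun l => l ++ [col]))
            PySem.Dict.empty).getD k []) []
        = ks.flatMap (fun k => cols.filter (fun c => c.1 == k)) := by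
      rw [PySem.List.foldl_append_eq_flatMap]
      simp only [List.nil_append]
      refine List.flatMap_congr ?_
      intro k _
      rw [bucket_getD]
      simp
    rw [hA, ← hB]
    congr 1
    refine List.filter_congr ?_
    intro c _
    rw [hcont]
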